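-- pv_equiv track=rewrite | github.com/axolp/komputeroweZintegrowaneWytwarzanie | tabu/tabu.py | without_tabu
-- ===== SOURCE A (Python) =====
-- def without_tabu(schedule, tabu_features):
--     for i in range(len(schedule) -1):
--         for t in tabu_features:
--             idx1= t[0]
--             idx2= t[1]
--             if schedule[i] == idx1 and schedule[i+1] == idx2:
--                 return False
--     return True
-- ===== SOURCE B (Python) =====
-- def without_tabu(schedule, tabu_features):
--     # index: first element of a tabu pair -> set of its forbidden successors
--     succ = {}
--     for t in tabu_features:
--         succ.setdefault(t[0], set()).add(t[1])
--     # single pass with a previous-element accumulator, early exit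
--     prev = None
--     for cur in schedule:
--         if prev is not None and cur in succ.get(prev, ()):
--             return False
--         prev = cur
--     return True
-- ===== Notes on version B (the rewrite author's own statement) =====
-- stated objective: faster
-- what changed: Replaced A's nested loops (every position against every tabu feature) by building a successor index (dict from first element to set of forbidden successors) once, then a single pass over the schedule carrying the previous element with an early exit.
import Mathlib
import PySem

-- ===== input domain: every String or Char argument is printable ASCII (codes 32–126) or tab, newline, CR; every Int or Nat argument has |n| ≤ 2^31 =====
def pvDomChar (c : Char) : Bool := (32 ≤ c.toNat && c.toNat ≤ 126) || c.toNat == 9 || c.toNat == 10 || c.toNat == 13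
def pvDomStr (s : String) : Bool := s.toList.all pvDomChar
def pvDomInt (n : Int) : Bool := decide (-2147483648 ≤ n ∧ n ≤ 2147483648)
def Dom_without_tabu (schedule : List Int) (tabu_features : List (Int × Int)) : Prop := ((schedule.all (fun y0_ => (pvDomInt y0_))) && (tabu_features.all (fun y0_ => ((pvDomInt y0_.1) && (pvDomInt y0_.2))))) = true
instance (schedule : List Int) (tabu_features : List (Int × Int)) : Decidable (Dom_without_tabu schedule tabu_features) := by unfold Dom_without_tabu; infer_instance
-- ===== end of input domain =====

-- B replaces A's nested loops by a successor index (dict first-element -> set of forbidden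
-- successors) built once, then one pass over the schedule carrying the previous element (faster).

-- ===== PORT A =====
-- inner loop: 'for t in tabu_features: … if schedule[i]==t[0] and schedule[i+1]==t[1]: return False'
def without_tabu_inner (schedule : List Int) (i : Int) : List (Int × Int) → Bool
  | [] => true
  | t :: ts =>
    let idx1 := t.1
    let idx2 := t.2
    if PySem.List.pyGetD schedule i 0 = idx1 ∧ PySem.List.pyGetD schedule (i + 1) 0 = idx2 then
      false
    else
      without_tabu_inner schedule i ts

-- outer loop: 'for i in range(len(schedule)-1)', early return False propagated
def without_tabu_outer (schedule : List Int) (tabu_features : List (Int × Int)) : List Int → Bool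
  | [] => true
  | i :: is =>
    if without_tabu_inner schedule i tabu_features then
      without_tabu_outer schedule tabu_features is
    else
      false

def without_tabu (schedule : List Int) (tabu_features : List (Int × Int)) : Bool :=
  without_tabu_outer schedule tabu_features
    (PySem.List.pyRange 0 (PySem.List.len schedule - 1) 1)

-- ===== PORT B =====
-- 'for t in tabu_features: succ.setdefault(t[0], set()).add(t[1])'
def without_tabu_succ (tabu_features : List (Int × Int)) : PySem.Dict Int (PySem.Set Int) :=
  tabu_features.foldl
    (fun d t => d.modify t.1 PySem.Set.empty (fun s => PySem.Set.add s t.2))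
    PySem.Dict.empty

-- 'for cur in schedule: if prev is not None and cur in succ.get(prev, ()): return False; prev = cur'
def without_tabu_scan (succ : PySem.Dict Int (PySem.Set Int)) : Option Int → List Int → Bool
  | _, [] => true
  | prev, cur :: rest =>
    if (match prev with
        | some p => PySem.Set.contains (succ.getD p PySem.Set.empty) cur
        | none => false) then
      false
    else
      without_tabu_scan succ (some cur) rest

def without_tabu_alt (schedule : List Int) (tabu_features : List (Int × Int)) : Bool :=
  without_tabu_scan (without_tabu_succ tabu_features) none schedule

-- ===== PRECONDITION & SPEC =====
def Spec_without_tabu (schedule : List Int) (tabu_features : List (Int × Int)) (out : Bool) : Prop := out = without_tabu_alt schedule tabu_features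
instance (schedule : List Int) (tabu_features : List (Int × Int)) (out : Bool) : Decidable (Spec_without_tabu schedule tabu_features out) := by unfold Spec_without_tabu; infer_instance

-- ===== CLAIM (what is proved, stated in full; the proofs are below) =====
def Claim_equal_without_tabu : Prop := ∀ (schedule : List Int) (tabu_features : List (Int × Int)), Dom_without_tabu schedule tabu_features → Spec_without_tabu schedule tabu_features (without_tabu schedule tabu_features)

-- ===== LEMMAS AND PROOFS =====

lemma inner_eq_not_mem (schedule : List Int) (i : Int) (ts : List (Int × Int)) :
    without_tabu_inner schedule i ts
      = !decide ((PySem.List.pyGetD schedule i 0, PySem.List.pyGetD schedule (i + 1) 0) ∈ ts) := by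
  induction ts with
  | nil => simp [without_tabu_inner]
  | cons t ts ih =>
    simp only [without_tabu_inner, ih, List.mem_cons]
    by_cases h : PySem.List.pyGetD schedule i 0 = t.1 ∧ PySem.List.pyGetD schedule (i + 1) 0 = t.2
    · simp only [if_pos h]
      simp [h.1, h.2]
    · simp only [if_neg h]
      have hne : (PySem.List.pyGetD schedule i 0, PySem.List.pyGetD schedule (i + 1) 0) ≠ t := by
        intro he; exact h (Prod.ext_iff.mp he)
      simp [hne]

lemma outer_eq_all (schedule : List Int) (tabu_features : List (Int × Int)) (is : List Int) :
    without_tabu_outer schedule tabu_features is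
      = is.all (fun i => without_tabu_inner schedule i tabu_features) := by
  induction is with
  | nil => rfl
  | cons i is ih =>
    simp only [without_tabu_outer, List.all_cons, ih]
    by_cases h : without_tabu_inner schedule i tabu_features <;> simp [h]

lemma mem_zip_tail_iff (s : List Int) (p : Int × Int) :
    p ∈ s.zip (s.drop 1) ↔ ∃ k : Nat, k + 1 < s.length ∧ p = (s.getD k 0, s.getD (k+1) 0) := by
  constructor
  · intro hp
    rw [List.mem_iff_getElem] at hp
    obtain ⟨k, hk, hget⟩ := hp
    have hlz : (s.zip (s.drop 1)).length = s.length - 1 := by simp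
    have hk1 : k + 1 < s.length := by omega
    refine ⟨k, hk1, ?_⟩
    rw [List.getElem_zip] at hget
    have hd : (s.drop 1)[k]'(by simp; omega) = s[k+1]'hk1 := by
      rw [List.getElem_drop]; congr 1; omega
    rw [hd] at hget
    rw [← hget]
    rw [List.getD_eq_getElem s 0 (by omega), List.getD_eq_getElem s 0 hk1]
  · rintro ⟨k, hk, rfl⟩
    rw [List.mem_iff_getElem]
    have hlz : (s.zip (s.drop 1)).length = s.length - 1 := by simp
    refine ⟨k, by omega, ?_⟩
    rw [List.getElem_zip]
    have hd : (s.drop 1)[k]'(by simp; omega) = s[k+1]'hk := by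
      rw [List.getElem_drop]; congr 1; omega
    rw [hd]
    rw [List.getD_eq_getElem s 0 (by omega), List.getD_eq_getElem s 0 hk]

-- A = true  iff  no adjacent pair of the schedule is a tabu feature
lemma a_iff (schedule : List Int) (tabu_features : List (Int × Int)) :
    without_tabu schedule tabu_features = true
      ↔ ∀ p ∈ schedule.zip (schedule.drop 1), p ∉ tabu_features := by
  unfold without_tabu
  rw [outer_eq_all, List.all_eq_true]
  constructor
  · intro h p hp hpt
    rw [mem_zip_tail_iff] at hp
    obtain ⟨k, hk, rfl⟩ := hp
    have hi : (k : Int) ∈ PySem.List.pyRange 0 (PySem.List.len schedule - 1) 1 := by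
      rw [PySem.List.mem_pyRange_one]
      refine ⟨by positivity, ?_⟩
      simp [PySem.List.len]; omega
    have hin := h _ hi
    rw [inner_eq_not_mem] at hin
    have hg1 : PySem.List.pyGetD schedule (k : Int) 0 = schedule.getD k 0 :=
      PySem.List.pyGetD_natCast ..
    have hg2 : PySem.List.pyGetD schedule ((k : Int) + 1) 0 = schedule.getD (k+1) 0 := by
      have hc : ((k : Int) + 1) = ((k + 1 : Nat) : Int) := by push_cast; ring
      rw [hc]; exact PySem.List.pyGetD_natCast ..
    rw [hg1, hg2] at hin
    simp only [Bool.not_eq_true', decide_eq_false_iff_not] at hin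
    exact hin hpt
  · intro h i hi
    rw [inner_eq_not_mem]
    simp only [Bool.not_eq_true', decide_eq_false_iff_not]
    intro hmem
    rw [PySem.List.mem_pyRange_one] at hi
    obtain ⟨h0, h1⟩ := hi
    obtain ⟨k, hik, hklt⟩ : ∃ k : Nat, (i : Int) = (k : Int) ∧ k + 1 < schedule.length := by
      refine ⟨i.toNat, by omega, ?_⟩
      simp [PySem.List.len] at h1
      omega
    have hg1 : PySem.List.pyGetD schedule i 0 = schedule.getD k 0 := by
      rw [hik]; exact PySem.List.pyGetD_natCast ..
    have hg2 : PySem.List.pyGetD schedule (i + 1) 0 = schedule.getD (k+1) 0 := by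
      have hc : i + 1 = ((k + 1 : Nat) : Int) := by push_cast; omega
      rw [hc]; exact PySem.List.pyGetD_natCast ..
    rw [hg1, hg2] at hmem
    exact h _ (mem_zip_tail_iff schedule _ |>.mpr ⟨k, hklt, rfl⟩) hmem

-- membership in the successor index = membership in the tabu list
lemma mem_succ_iff (l : List (Int × Int)) (d : PySem.Dict Int (PySem.Set Int)) (a b : Int) :
    b ∈ (l.foldl (fun d t => d.modify t.1 PySem.Set.empty (fun s => PySem.Set.add s t.2)) d).getD a PySem.Set.empty
      ↔ b ∈ d.getD a PySem.Set.empty ∨ (a, b) ∈ l := by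
  induction l generalizing d with
  | nil => simp
  | cons t ts ih =>
    simp only [List.foldl_cons, ih, List.mem_cons]
    rw [PySem.Dict.getD_modify]
    by_cases h : a = t.1
    · rw [if_pos h, h]
      simp only [PySem.Set.mem_add, Prod.ext_iff]
      tauto
    · rw [if_neg h]
      simp only [Prod.ext_iff]
      tauto

lemma mem_without_tabu_succ (tabu_features : List (Int × Int)) (a b : Int) :
    b ∈ (without_tabu_succ tabu_features).getD a PySem.Set.empty ↔ (a, b) ∈ tabu_features := by
  unfold without_tabu_succ
  rw [mem_succ_iff]
  simp

-- the B scan = true  iff  no adjacent pair of (p :: l) is a tabu feature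
lemma scan_iff (tabu_features : List (Int × Int)) (p : Int) (l : List Int) :
    without_tabu_scan (without_tabu_succ tabu_features) (some p) l = true
      ↔ ∀ q ∈ (p :: l).zip l, q ∉ tabu_features := by
  induction l generalizing p with
  | nil => simp [without_tabu_scan]
  | cons cur rest ih =>
    simp only [without_tabu_scan]
    by_cases h : PySem.Set.contains ((without_tabu_succ tabu_features).getD p PySem.Set.empty) cur
    · simp only [if_pos h]
      have : (p, cur) ∈ tabu_features := by
        rw [← mem_without_tabu_succ]
        simpa [PySem.Set.contains] using h
      constructor
      · intro hf; cases hf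
      · intro hall
        exact absurd this (hall (p, cur) (by simp [List.zip_cons_cons]))
    · simp only [if_neg h, ih]
      have hnp : (p, cur) ∉ tabu_features := by
        rw [← mem_without_tabu_succ]
        intro hm
        exact h (by simpa [PySem.Set.contains] using hm)
      constructor
      · intro hall q hq
        rw [List.zip_cons_cons, List.mem_cons] at hq
        rcases hq with rfl | hq
        · exact hnp
        · exact hall q hq
      · intro hall q hq
        exact hall q (by rw [List.zip_cons_cons, List.mem_cons]; exact Or.inr hq)

lemma b_iff (schedule : List Int) (tabu_features : List (Int × Int)) :
    without_tabu_alt schedule tabu_features = true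
      ↔ ∀ p ∈ schedule.zip (schedule.drop 1), p ∉ tabu_features := by
  unfold without_tabu_alt
  cases schedule with
  | nil => simp [without_tabu_scan]
  | cons x rest =>
    simp only [without_tabu_scan, if_neg (by simp : ¬ (false = true))]
    rw [scan_iff]
    simp

-- ===== VERDICT (by name: the statement is the Claim_ definition above) =====
theorem without_tabu_spec : Claim_equal_without_tabu := by
  intro schedule tabu_features _
  unfold Spec_without_tabu
  rw [Bool.eq_iff_iff, a_iff, b_iff]
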